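-- pv_equiv track=rewrite | github.com/gzvca/ICT304 | pages/smartcount.py | stable_video_count
-- ===== SOURCE A (Python) =====
-- def stable_video_count(all_counts):
--     final_counts = {}
--
--     for cls_name, values in all_counts.items():
--         nonzero = [v for v in values if v > 0]
--         if nonzero:
--             nonzero.sort()
--             idx = int(0.75 * (len(nonzero) - 1))
--             final_counts[cls_name] = int(round(nonzero[idx]))
--
--     return final_counts
-- ===== SOURCE B (Python) =====
-- def _nth_smallest(xs, k):
--     # iterative three-way-partition quickselect: k-th smallest of xs (0-based)
--     while True:
--         p = xs[len(xs) // 2]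
--         lt = [v for v in xs if v < p]
--         if k < len(lt):
--             xs = lt
--             continue
--         eq = len([v for v in xs if v == p])
--         if k < len(lt) + eq:
--             return p
--         k = k - len(lt) - eq
--         xs = [v for v in xs if v > p]
--
--
-- def stable_video_count(all_counts):
--     final_counts = {}
--     for cls_name, values in all_counts.items():
--         nonzero = [v for v in values if v > 0]
--         if nonzero:
--             final_counts[cls_name] = _nth_smallest(nonzero, 3 * (len(nonzero) - 1) // 4)
--     return final_counts
-- ===== Notes on version B (the rewrite author's own statement) =====
-- stated objective: alternative
-- what changed: Replaces the per-class full sort plus index with an iterative three-way-partition quickselect that finds only the 75th-percentile element, and computes the index with exact integer arithmetic 3*(n-1)//4 instead of int(0.75*(n-1)).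
import Mathlib
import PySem

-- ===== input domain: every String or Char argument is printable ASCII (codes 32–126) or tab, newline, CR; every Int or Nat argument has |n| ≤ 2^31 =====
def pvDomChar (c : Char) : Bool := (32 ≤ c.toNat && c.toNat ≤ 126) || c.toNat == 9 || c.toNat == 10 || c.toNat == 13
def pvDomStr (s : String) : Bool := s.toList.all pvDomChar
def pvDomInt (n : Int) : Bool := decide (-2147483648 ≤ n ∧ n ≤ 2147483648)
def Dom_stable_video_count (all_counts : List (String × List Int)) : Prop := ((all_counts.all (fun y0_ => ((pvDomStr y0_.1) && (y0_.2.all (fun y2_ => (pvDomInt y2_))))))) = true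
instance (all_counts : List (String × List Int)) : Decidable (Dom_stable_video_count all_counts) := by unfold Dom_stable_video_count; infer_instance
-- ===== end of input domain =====

-- B replaces A's per-class sort-then-index with a three-way quickselect that finds
-- only the 75th-percentile element (objective: alternative algorithm, similar cost).

-- ===== PORT A =====
-- Python: idx = int(0.75 * (len(nonzero) - 1)); the float product is exact for any list
-- length (n - 1 < 2^53), so int(0.75 * (n - 1)) = 3 * (n - 1) / 4 in Nat arithmetic.
-- nonzero[idx] is ported as .getD idx 0: idx = 3*(n-1)/4 ≤ n-1 is always in range.
-- int(round(v)) is the identity on a Python int v.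
def stable_video_count (all_counts : List (String × List Int)) : List (String × Int) :=
  (all_counts.foldl
    (fun (final_counts : PySem.Dict String Int) cv =>
      let nonzero := cv.2.filter (fun v => 0 < v)
      if nonzero ≠ [] then
        let s := PySem.List.sorted nonzero (fun x => x) false
        let idx := 3 * (nonzero.length - 1) / 4
        final_counts.insert cv.1 (s.getD idx 0)
      else final_counts)
    PySem.Dict.empty).items

-- ===== PORT B =====
-- termination helper for the quickselect loop, cited by decreasing_by
theorem pv_getD_mem {α : Type} [Inhabited α] (l : List α) (n : Nat) (d : α) (h : n < l.length) :
    l.getD n d ∈ l := by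
  rw [List.getD_eq_getElem l d h]
  exact List.getElem_mem h

-- iterative quickselect loop of Source B, as structural recursion (each partition is
-- strictly shorter); the [] case is unreachable (the loop only runs on nonempty xs).
def qselB (xs : List Int) (k : Nat) : Int :=
  match xs with
  | [] => 0
  | x :: t =>
    let p := (x :: t).getD ((x :: t).length / 2) 0
    let lt := (x :: t).filter (fun v => v < p)
    if k < lt.length then qselB lt k
    else
      let eq := ((x :: t).filter (fun v => v = p)).length
      if k < lt.length + eq then p
      else qselB ((x :: t).filter (fun v => p < v)) (k - lt.length - eq)
  termination_by xs.length
  decreasing_by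
  · exact List.length_filter_lt_length_iff_exists.mpr
      ⟨(x :: t).getD ((x :: t).length / 2) 0,
       pv_getD_mem _ _ _ (Nat.div_lt_self (by simp) one_lt_two), by simp⟩
  · exact List.length_filter_lt_length_iff_exists.mpr
      ⟨(x :: t).getD ((x :: t).length / 2) 0,
       pv_getD_mem _ _ _ (Nat.div_lt_self (by simp) one_lt_two), by simp⟩

def stable_video_count_alt (all_counts : List (String × List Int)) : List (String × Int) :=
  (all_counts.foldl
    (fun (final_counts : PySem.Dict String Int) cv =>
      let nonzero := cv.2.filter (fun v => 0 < v)
      if nonzero ≠ [] then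
        final_counts.insert cv.1 (qselB nonzero (3 * (nonzero.length - 1) / 4))
      else final_counts)
    PySem.Dict.empty).items

-- ===== PRECONDITION & SPEC =====
def Spec_stable_video_count (all_counts : List (String × List Int)) (out : List (String × Int)) : Prop := out = stable_video_count_alt all_counts
instance (all_counts : List (String × List Int)) (out : List (String × Int)) : Decidable (Spec_stable_video_count all_counts out) := by unfold Spec_stable_video_count; infer_instance

-- ===== CLAIM (what is proved, stated in full; the proofs are below) =====
def Claim_equal_stable_video_count : Prop := ∀ (all_counts : List (String × List Int)), Dom_stable_video_count all_counts → Spec_stable_video_count all_counts (stable_video_count all_counts)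

-- ===== LEMMAS AND PROOFS =====

theorem count_filter_lt (a p : Int) (xs : List Int) :
    (xs.filter (fun v => v < p)).count a = if a < p then xs.count a else 0 := by
  by_cases h : a < p
  · rw [if_pos h, List.count_filter (by simpa using h)]
  · rw [if_neg h, List.count_eq_zero.mpr]
    simp only [List.mem_filter, decide_eq_true_eq, not_and]
    exact fun _ => h

theorem count_filter_eq (a p : Int) (xs : List Int) :
    (xs.filter (fun v => v = p)).count a = if a = p then xs.count a else 0 := by
  by_cases h : a = p
  · rw [if_pos h, List.count_filter (by simpa using h)]
  · rw [if_neg h, List.count_eq_zero.mpr]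
    simp only [List.mem_filter, decide_eq_true_eq, not_and]
    exact fun _ => h

theorem count_filter_gt (a p : Int) (xs : List Int) :
    (xs.filter (fun v => p < v)).count a = if p < a then xs.count a else 0 := by
  by_cases h : p < a
  · rw [if_pos h, List.count_filter (by simpa using h)]
  · rw [if_neg h, List.count_eq_zero.mpr]
    simp only [List.mem_filter, decide_eq_true_eq, not_and]
    exact fun _ => h

-- the three-way partition of xs at p is a permutation of xs (counting argument)
theorem part3_perm (p : Int) (xs : List Int) :
    (xs.filter (fun v => v < p) ++ (xs.filter (fun v => v = p) ++ xs.filter (fun v => p < v))).Perm xs := by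
  refine List.perm_iff_count.mpr (fun a => ?_)
  simp only [List.count_append, count_filter_lt, count_filter_eq, count_filter_gt]
  rcases lt_trichotomy a p with h | h | h <;> split_ifs <;> omega

-- sorted(xs) splits as sorted(<p) ++ (=p) ++ sorted(>p)
theorem sorted_part3 (p : Int) (xs : List Int) :
    PySem.List.sorted xs (fun x => x) false =
      PySem.List.sorted (xs.filter (fun v => v < p)) (fun x => x) false
        ++ (xs.filter (fun v => v = p)
        ++ PySem.List.sorted (xs.filter (fun v => p < v)) (fun x => x) false) := by
  apply PySem.List.sorted_id_eq_of_perm_of_pairwise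
  · exact ((PySem.List.sorted_perm _ _ _).append
      ((List.Perm.refl _).append (PySem.List.sorted_perm _ _ _))).trans (part3_perm p xs)
  · rw [List.pairwise_append, List.pairwise_append]
    refine ⟨PySem.List.sorted_pairwise _ _, ⟨?_, PySem.List.sorted_pairwise _ _, ?_⟩, ?_⟩
    · apply List.pairwise_of_forall_mem_list
      intro a ha b hb
      simp only [List.mem_filter, decide_eq_true_eq] at ha hb
      omega
    · intro a ha b hb
      simp only [List.mem_filter, decide_eq_true_eq] at ha
      have hb' := (PySem.List.mem_sorted _ _ _ _).mp hb
      simp only [List.mem_filter, decide_eq_true_eq] at hb'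
      omega
    · intro a ha b hb
      have ha' := (PySem.List.mem_sorted _ _ _ _).mp ha
      simp only [List.mem_filter, decide_eq_true_eq] at ha'
      rcases List.mem_append.mp hb with hb | hb
      · simp only [List.mem_filter, decide_eq_true_eq] at hb
        omega
      · have hb' := (PySem.List.mem_sorted _ _ _ _).mp hb
        simp only [List.mem_filter, decide_eq_true_eq] at hb'
        omega

-- quickselect returns the k-th element of the sorted list
theorem qselB_eq_sorted_aux (n : Nat) : ∀ (xs : List Int), xs.length ≤ n → ∀ (k : Nat), k < xs.length →
    qselB xs k = (PySem.List.sorted xs (fun x => x) false).getD k 0 := by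
  induction n with
  | zero => intro xs hn k hk; omega
  | succ n ih =>
    intro xs hn k hk
    match xs with
    | [] => simp at hk
    | x :: t =>
      simp only [qselB]
      set P := (x :: t).getD ((x :: t).length / 2) 0 with hP
      have hPmem : P ∈ x :: t := pv_getD_mem _ _ _ (Nat.div_lt_self (by simp) one_lt_two)
      have hlt : ((x :: t).filter (fun v => v < P)).length < (x :: t).length :=
        List.length_filter_lt_length_iff_exists.mpr ⟨P, hPmem, by simp⟩
      have hgt : ((x :: t).filter (fun v => P < v)).length < (x :: t).length :=
        List.length_filter_lt_length_iff_exists.mpr ⟨P, hPmem, by simp⟩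
      have hsum : ((x :: t).filter (fun v => v < P)).length
          + (((x :: t).filter (fun v => v = P)).length
          + ((x :: t).filter (fun v => P < v)).length) = (x :: t).length := by
        have := (part3_perm P (x :: t)).length_eq
        simpa [List.length_append] using this
      rw [sorted_part3 P (x :: t)]
      split_ifs with h1 h2
      · rw [List.getD_append _ _ _ _ (by rwa [PySem.List.length_sorted])]
        exact ih _ (by omega) k h1
      · rw [List.getD_append_right _ _ _ _ (by rw [PySem.List.length_sorted]; omega),
            List.getD_append _ _ _ _ (by rw [PySem.List.length_sorted]; omega),
            PySem.List.length_sorted]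
        have hmem : ((x :: t).filter (fun v => v = P)).getD
            (k - ((x :: t).filter (fun v => v < P)).length) 0 ∈ (x :: t).filter (fun v => v = P) :=
          pv_getD_mem _ _ _ (by omega)
        simp only [List.mem_filter, decide_eq_true_eq] at hmem
        exact hmem.2.symm
      · rw [List.getD_append_right _ _ _ _ (by rw [PySem.List.length_sorted]; omega),
            List.getD_append_right _ _ _ _ (by rw [PySem.List.length_sorted]; omega)]
        rw [PySem.List.length_sorted, Nat.sub_sub]
        exact ih _ (by omega) _ (by omega)

theorem qselB_eq_sorted (xs : List Int) (k : Nat) (hk : k < xs.length) :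
    qselB xs k = (PySem.List.sorted xs (fun x => x) false).getD k 0 :=
  qselB_eq_sorted_aux xs.length xs le_rfl k hk

-- ===== VERDICT (by name: the statement is the Claim_ definition above) =====
theorem stable_video_count_spec : Claim_equal_stable_video_count := by
  intro all_counts _
  unfold Spec_stable_video_count stable_video_count stable_video_count_alt
  congr 1
  apply PySem.List.foldl_congr_mem
  intro d cv _
  simp only []
  by_cases hnz : cv.2.filter (fun v => 0 < v) = []
  · simp [hnz]
  · rw [if_pos hnz, if_pos hnz,
        (qselB_eq_sorted _ _ (by
          have : 0 < (cv.2.filter (fun v => 0 < v)).length := List.length_pos_iff.mpr hnz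
          omega)).symm]
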